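-- pv_equiv track=rewrite | github.com/Ali222w/Optimal1 | Optimal.py | extract_complete_sentences
-- ===== SOURCE A (Python) =====
-- def extract_complete_sentences(text, max_length=200):
--     """استخراج جمل كاملة من النص"""
--     # تقسيم النص إلى جمل
--     sentences = text.split('.')
--     complete_text = []
--     current_length = 0
--
--     for sentence in sentences:
--         sentence = sentence.strip()
--         if not sentence:
--             continue
--
--         # التأكد من أن الجملة تبدأ بحرف كبير وتنتهي بنقطة
--         if sentence[0].isalpha():
--             sentence = sentence[0].upper() + sentence[1:]
--         if not sentence.endswith('.'):
--             sentence += '.'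
--
--         # إضافة الجملة إذا كانت ضمن الحد الأقصى للطول
--         if current_length + len(sentence) <= max_length:
--             complete_text.append(sentence)
--             current_length += len(sentence)
--         else:
--             break
--
--     return ' '.join(complete_text)
-- ===== SOURCE B (Python) =====
-- def _format(part):
--     """Strip, capitalize a leading letter, ensure trailing period; None for empty parts."""
--     s = part.strip()
--     if not s:
--         return None
--     if s[0].isalpha():
--         s = s[0].upper() + s[1:]
--     if not s.endswith('.'):
--         s += '.'
--     return s
--
--
-- def extract_complete_sentences(text, max_length=200):
--     # transform phase: formatted sentences in order
--     formatted = [f for f in (_format(p) for p in text.split('.')) if f is not None]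
--     # prefix-sum table of the formatted lengths
--     total, cums = 0, []
--     for f in formatted:
--         total += len(f)
--         cums.append(total)
--     # selection: lengths are positive, so the prefix sums are strictly increasing
--     # and counting the sums <= max_length gives the longest admissible prefix
--     kept = sum(1 for c in cums if c <= max_length)
--     return ' '.join(formatted[:kept])
-- ===== Notes on version B (the rewrite author's own statement) =====
-- stated objective: alternative
-- what changed: A's single loop that formats each sentence and breaks when the running length would exceed the limit is replaced by three phases: format all sentences, build the prefix-sum table of their lengths, and select the longest admissible prefix by counting prefix sums <= max_length (valid since lengths are positive, so the sums are strictly increasing).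
import Mathlib
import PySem

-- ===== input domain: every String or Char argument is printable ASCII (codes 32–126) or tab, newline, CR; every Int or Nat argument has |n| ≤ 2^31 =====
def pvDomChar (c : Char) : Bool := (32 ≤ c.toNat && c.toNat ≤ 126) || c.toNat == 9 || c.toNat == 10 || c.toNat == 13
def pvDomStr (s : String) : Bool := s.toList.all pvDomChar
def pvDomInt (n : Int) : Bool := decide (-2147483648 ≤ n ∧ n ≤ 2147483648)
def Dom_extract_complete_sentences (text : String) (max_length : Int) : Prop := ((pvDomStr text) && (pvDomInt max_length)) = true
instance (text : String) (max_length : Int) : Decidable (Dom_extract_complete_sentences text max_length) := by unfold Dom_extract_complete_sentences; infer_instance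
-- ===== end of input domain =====

-- B replaces A's interleaved format-and-break loop by a transform phase, a prefix-sum
-- table and a count-based selection (objective: alternative decomposition, same cost).

-- ===== PORT A =====
-- A's loop over the split parts: strip, skip empties, capitalize a leading letter,
-- append '.', stop at the first sentence that would exceed max_length.
def pvALoop (maxL : Int) : List (List Char) → List (List Char) → Int → List (List Char)
  | [], acc, _ => acc
  | s :: rest, acc, cur =>
    let s1 := PySem.Chars.strip s
    match s1 with
    | [] => pvALoop maxL rest acc cur
    | c :: t =>
      let s2 := if PySem.Chars.isalpha c then PySem.Chars.upperChar c :: t else c :: t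
      let s3 := if PySem.Chars.endswith s2 ['.'] then s2 else s2 ++ ['.']
      if cur + (s3.length : Int) ≤ maxL then
        pvALoop maxL rest (acc ++ [s3]) (cur + (s3.length : Int))
      else acc

def extract_complete_sentences (text : String) (max_length : Int) : String :=
  String.ofList (PySem.Chars.join [' '] (pvALoop max_length (PySem.Chars.splitOn text.toList ['.']) [] 0))

-- ===== PORT B =====
-- _format from Source B
def pvFmt (part : List Char) : Option (List Char) :=
  match PySem.Chars.strip part with
  | [] => none
  | c :: t =>
    let s := if PySem.Chars.isalpha c then PySem.Chars.upperChar c :: t else c :: t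
    some (if PySem.Chars.endswith s ['.'] then s else s ++ ['.'])

def extract_complete_sentences_alt (text : String) (max_length : Int) : String :=
  let formatted := (PySem.Chars.splitOn text.toList ['.']).filterMap pvFmt
  let cums := (formatted.foldl
      (fun (p : Int × List Int) f => (p.1 + (f.length : Int), p.2 ++ [p.1 + (f.length : Int)]))
      (0, [])).2
  let kept := cums.countP (fun c => decide (c ≤ max_length))
  String.ofList (PySem.Chars.join [' '] (formatted.take kept))

-- ===== PRECONDITION & SPEC =====
def Spec_extract_complete_sentences (text : String) (max_length : Int) (out : String) : Prop := out = extract_complete_sentences_alt text max_length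
instance (text : String) (max_length : Int) (out : String) : Decidable (Spec_extract_complete_sentences text max_length out) := by unfold Spec_extract_complete_sentences; infer_instance

-- ===== CLAIM (what is proved, stated in full; the proofs are below) =====
def Claim_equal_extract_complete_sentences : Prop := ∀ (text : String) (max_length : Int), Dom_extract_complete_sentences text max_length → Spec_extract_complete_sentences text max_length (extract_complete_sentences text max_length)

-- ===== LEMMAS AND PROOFS =====

-- prefix sums of the lengths starting from cur
def pvCums (cur : Int) : List (List Char) → List Int
  | [] => []
  | f :: rest => (cur + (f.length : Int)) :: pvCums (cur + (f.length : Int)) rest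

-- A's selection, on the already-formatted list
def pvSel (maxL : Int) (cur : Int) : List (List Char) → List (List Char)
  | [] => []
  | f :: rest => if cur + (f.length : Int) ≤ maxL then f :: pvSel maxL (cur + (f.length : Int)) rest else []

lemma pvALoop_eq_sel (maxL : Int) : ∀ (parts acc : List (List Char)) (cur : Int),
    pvALoop maxL parts acc cur = acc ++ pvSel maxL cur (parts.filterMap pvFmt) := by
  intro parts
  induction parts with
  | nil => simp [pvALoop, pvSel]
  | cons s rest ih =>
    intro acc cur
    have key : ∀ f : List Char,
        (if cur + (f.length : Int) ≤ maxL then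
            pvALoop maxL rest (acc ++ [f]) (cur + (f.length : Int))
          else acc) = acc ++ pvSel maxL cur (f :: rest.filterMap pvFmt) := by
      intro f
      simp only [pvSel]
      by_cases hf : cur + (f.length : Int) ≤ maxL
      · simp [hf, ih, List.append_assoc]
      · simp [hf]
    cases h : PySem.Chars.strip s with
    | nil =>
      simp only [pvALoop, List.filterMap_cons, pvFmt, h]
      exact ih acc cur
    | cons c t =>
      simp only [pvALoop, List.filterMap_cons, pvFmt, h]
      exact key _

lemma pvCums_lb : ∀ (fs : List (List Char)) (cur : Int), ∀ x ∈ pvCums cur fs, cur ≤ x := by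
  intro fs
  induction fs with
  | nil => simp [pvCums]
  | cons f rest ih =>
    intro cur x hx
    have h0 : (0 : Int) ≤ (f.length : Int) := Int.natCast_nonneg _
    simp only [pvCums, List.mem_cons] at hx
    rcases hx with rfl | hx
    · omega
    · have h1 := ih (cur + (f.length : Int)) x hx
      omega

lemma pvSel_eq_take (maxL : Int) : ∀ (fs : List (List Char)) (cur : Int),
    pvSel maxL cur fs = fs.take ((pvCums cur fs).countP (fun c => decide (c ≤ maxL))) := by
  intro fs
  induction fs with
  | nil => simp [pvSel, pvCums]
  | cons f rest ih =>
    intro cur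
    by_cases hle : cur + (f.length : Int) ≤ maxL
    · simp [pvSel, pvCums, hle, ih]
    · have hz : (pvCums (cur + (f.length : Int)) rest).countP (fun c => decide (c ≤ maxL)) = 0 := by
        rw [List.countP_eq_zero]
        intro x hx
        have h1 := pvCums_lb rest (cur + (f.length : Int)) x hx
        simp only [decide_eq_true_eq]
        omega
      simp [pvSel, pvCums, hle, hz]

lemma pvFoldl_cums : ∀ (fs : List (List Char)) (cur : Int) (acc : List Int),
    (fs.foldl (fun (p : Int × List Int) f => (p.1 + (f.length : Int), p.2 ++ [p.1 + (f.length : Int)]))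
      (cur, acc)).2 = acc ++ pvCums cur fs := by
  intro fs
  induction fs with
  | nil => simp [pvCums]
  | cons f rest ih =>
    intro cur acc
    simp [pvCums, ih, List.append_assoc]

-- ===== VERDICT (by name: the statement is the Claim_ definition above) =====
theorem extract_complete_sentences_spec : Claim_equal_extract_complete_sentences := by
  intro text maxL _
  unfold Spec_extract_complete_sentences extract_complete_sentences extract_complete_sentences_alt
  simp only [pvALoop_eq_sel, pvFoldl_cums, pvSel_eq_take, List.nil_append]
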